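-- pv_equiv track=rewrite | github.com/Infinidrix/competitive-programming | Day 23/q2.py | isYasserHappy
-- ===== SOURCE A (Python) =====
-- def isYasserHappy(tastiness):
-- 	summation = 0
-- 	total_sum = sum(tastiness)
-- 	for i in range(len(tastiness)):
-- 		if tastiness[i] <= 0 and (-tastiness[i] >= summation or -tastiness[i] >= total_sum - summation - tastiness[i]) :
-- 			return "NO"
-- 		summation += tastiness[i]
-- 	return "YES"
-- ===== SOURCE B (Python) =====
-- def isYasserHappy(tastiness):
--     def violates(seq):
--         run = 0
--         for x in seq:
--             if x <= 0 and -x >= run: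
--                 return True
--             run += x
--         return False
--
--     if violates(tastiness):
--         return "NO"
--     if violates(reversed(tastiness)):
--         return "NO"
--     return "YES"
-- ===== Notes on version B (the rewrite author's own statement) =====
-- stated objective: simpler
-- what changed: Replaces A's single loop with the combined prefix-or-suffix test (needing the precomputed total sum) by two independent running-sum scans sharing one small helper: a forward pass checking each non-positive element against the prefix sum, then a backward pass checking it against the suffix sum.
import Mathlib
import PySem

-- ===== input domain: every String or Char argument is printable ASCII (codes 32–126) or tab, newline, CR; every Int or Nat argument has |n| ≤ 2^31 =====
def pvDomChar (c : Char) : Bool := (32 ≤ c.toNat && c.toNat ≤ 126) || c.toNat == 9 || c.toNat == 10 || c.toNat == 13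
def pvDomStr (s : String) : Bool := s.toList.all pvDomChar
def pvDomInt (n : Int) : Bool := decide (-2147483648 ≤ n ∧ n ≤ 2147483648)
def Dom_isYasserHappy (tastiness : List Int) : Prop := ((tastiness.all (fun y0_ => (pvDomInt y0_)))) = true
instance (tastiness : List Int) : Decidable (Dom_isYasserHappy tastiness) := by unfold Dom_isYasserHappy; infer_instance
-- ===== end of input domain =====

-- B splits A's combined prefix/suffix test into two independent running-sum passes (forward then backward); same output, objective: simpler decomposition.

-- ===== PORT A =====
-- A's loop over indices with running `summation` and fixed `total_sum`, ported as structural recursion over the list.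
def pvGoA (total : Int) : List Int → Int → String
  | [], _ => "YES"
  | x :: rest, s =>
      if x ≤ 0 ∧ (s ≤ -x ∨ total - s - x ≤ -x) then "NO" else pvGoA total rest (s + x)

def isYasserHappy (tastiness : List Int) : String := pvGoA tastiness.sum tastiness 0

-- ===== PORT B =====
-- B's helper `violates(seq)`: running sum, flag a non-positive element whose magnitude ≥ the sum so far.
def pvViolates : List Int → Int → Bool
  | [], _ => false
  | x :: rest, s => if x ≤ 0 ∧ s ≤ -x then true else pvViolates rest (s + x)

def isYasserHappy_alt (tastiness : List Int) : String :=
  if pvViolates tastiness 0 then "NO"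
  else if pvViolates tastiness.reverse 0 then "NO"
  else "YES"

-- ===== PRECONDITION & SPEC =====
def Spec_isYasserHappy (tastiness : List Int) (out : String) : Prop := out = isYasserHappy_alt tastiness
instance (tastiness : List Int) (out : String) : Decidable (Spec_isYasserHappy tastiness out) := by unfold Spec_isYasserHappy; infer_instance

-- ===== CLAIM (what is proved, stated in full; the proofs are below) =====
def Claim_equal_isYasserHappy : Prop := ∀ (tastiness : List Int), Dom_isYasserHappy tastiness → Spec_isYasserHappy tastiness (isYasserHappy tastiness)

-- ===== LEMMAS AND PROOFS =====

lemma pvViolates_step (a : Int) (t : List Int) (s : Int) :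
    pvViolates (a :: t) s = if a ≤ 0 ∧ s ≤ -a then true else pvViolates t (s + a) := rfl

lemma pvGoA_step (total a : Int) (t : List Int) (s : Int) :
    pvGoA total (a :: t) s =
      if a ≤ 0 ∧ (s ≤ -a ∨ total - s - a ≤ -a) then "NO" else pvGoA total t (s + a) := rfl

lemma pvViolates_iff (t : List Int) : ∀ s : Int,
    pvViolates t s = true ↔ ∃ l x r, t = l ++ x :: r ∧ x ≤ 0 ∧ s + l.sum ≤ -x := by
  induction t with
  | nil =>
      intro s
      constructor
      · intro h; exact absurd h (by simp [pvViolates])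
      · rintro ⟨l, x, r, h, -, -⟩; exact absurd h (by simp)
  | cons a t ih =>
      intro s
      by_cases h : a ≤ 0 ∧ s ≤ -a
      · rw [pvViolates_step, if_pos h]
        constructor
        · intro _; exact ⟨[], a, t, by simp, h.1, by simpa using h.2⟩
        · intro _; rfl
      · rw [pvViolates_step, if_neg h, ih]
        constructor
        · rintro ⟨l, x, r, rfl, hx, hs⟩
          exact ⟨a :: l, x, r, rfl, hx, by simp at hs ⊢; linarith⟩
        · rintro ⟨l, x, r, he, hx, hs⟩
          cases l with
          | nil =>
              simp at he
              obtain ⟨rfl, rfl⟩ := he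
              exact absurd ⟨hx, by simpa using hs⟩ h
          | cons b l =>
              simp at he
              obtain ⟨rfl, rfl⟩ := he
              exact ⟨l, x, r, rfl, hx, by simp at hs ⊢; linarith⟩

lemma pvGoA_iff (total : Int) (t : List Int) : ∀ s : Int,
    pvGoA total t s = "NO" ↔
      ∃ l x r, t = l ++ x :: r ∧ x ≤ 0 ∧
        (s + l.sum ≤ -x ∨ total - (s + l.sum) - x ≤ -x) := by
  induction t with
  | nil =>
      intro s
      constructor
      · intro h; exact absurd h (by simp [pvGoA])
      · rintro ⟨l, x, r, h, -, -⟩; exact absurd h (by simp)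
  | cons a t ih =>
      intro s
      by_cases h : a ≤ 0 ∧ (s ≤ -a ∨ total - s - a ≤ -a)
      · rw [pvGoA_step, if_pos h]
        constructor
        · intro _
          exact ⟨[], a, t, by simp, h.1, by simpa using h.2⟩
        · intro _; rfl
      · rw [pvGoA_step, if_neg h, ih]
        constructor
        · rintro ⟨l, x, r, rfl, hx, hs⟩
          refine ⟨a :: l, x, r, rfl, hx, ?_⟩
          simp at hs ⊢
          rcases hs with hs | hs
          · exact Or.inl (by linarith)
          · exact Or.inr (by linarith)
        · rintro ⟨l, x, r, he, hx, hs⟩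
          cases l with
          | nil =>
              simp at he
              obtain ⟨rfl, rfl⟩ := he
              exact absurd ⟨hx, by simpa using hs⟩ h
          | cons b l =>
              simp at he
              obtain ⟨rfl, rfl⟩ := he
              refine ⟨l, x, r, rfl, hx, ?_⟩
              simp at hs ⊢
              rcases hs with hs | hs
              · exact Or.inl (by linarith)
              · exact Or.inr (by linarith)

lemma pvGoA_yes (total : Int) (t : List Int) : ∀ s : Int,
    pvGoA total t s ≠ "NO" → pvGoA total t s = "YES" := by
  induction t with
  | nil => intro s _; rfl
  | cons a t ih =>
      intro s h
      by_cases hc : a ≤ 0 ∧ (s ≤ -a ∨ total - s - a ≤ -a)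
      · exact absurd (by rw [pvGoA_step, if_pos hc]) h
      · rw [pvGoA_step, if_neg hc] at h ⊢
        exact ih _ h

lemma pvViolates_rev_iff (t : List Int) :
    pvViolates t.reverse 0 = true ↔ ∃ l x r, t = l ++ x :: r ∧ x ≤ 0 ∧ r.sum ≤ -x := by
  rw [pvViolates_iff]
  constructor
  · rintro ⟨l, x, r, he, hx, hs⟩
    have ht : t = r.reverse ++ x :: l.reverse := by
      have h2 := congrArg List.reverse he
      simpa [List.reverse_append] using h2
    exact ⟨r.reverse, x, l.reverse, ht, hx, by simpa using hs⟩
  · rintro ⟨l, x, r, ht, hx, hs⟩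
    refine ⟨r.reverse, x, l.reverse, ?_, hx, by simpa using hs⟩
    simp [ht, List.reverse_append]

-- ===== VERDICT (by name: the statement is the Claim_ definition above) =====
theorem isYasserHappy_spec : Claim_equal_isYasserHappy := by
  intro t _
  unfold Spec_isYasserHappy isYasserHappy isYasserHappy_alt
  by_cases h1 : pvViolates t 0 = true
  · rw [if_pos h1]
    obtain ⟨l, x, r, rfl, hx, hs⟩ := (pvViolates_iff t 0).mp h1
    exact (pvGoA_iff _ _ 0).mpr ⟨l, x, r, rfl, hx, Or.inl hs⟩
  · rw [if_neg h1]
    by_cases h2 : pvViolates t.reverse 0 = true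
    · rw [if_pos h2]
      obtain ⟨l, x, r, rfl, hx, hs⟩ := (pvViolates_rev_iff t).mp h2
      refine (pvGoA_iff _ _ 0).mpr ⟨l, x, r, rfl, hx, Or.inr ?_⟩
      have hsum : (l ++ x :: r).sum = l.sum + (x + r.sum) := by simp
      rw [hsum]; linarith
    · rw [if_neg h2]
      apply pvGoA_yes
      intro hno
      obtain ⟨l, x, r, rfl, hx, hs⟩ := (pvGoA_iff _ _ 0).mp hno
      rcases hs with hs | hs
      · exact h1 ((pvViolates_iff _ 0).mpr ⟨l, x, r, rfl, hx, hs⟩)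
      · apply h2
        refine (pvViolates_rev_iff _).mpr ⟨l, x, r, rfl, hx, ?_⟩
        have hsum : (l ++ x :: r).sum = l.sum + (x + r.sum) := by simp
        rw [hsum] at hs; linarith
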